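-- pv_equiv track=rewrite | github.com/shamhi/NotCoinBot | bot/utils/scripts.py | get_bad_statuses_count
-- ===== SOURCE A (Python) =====
-- def get_bad_statuses_count(request_statuses: list[str]) -> int:
--     count = 0
--     for status in request_statuses:
--         if status.startswith('2'):
--             count = 0
--             continue
--
--         count += 1
--
--     return count
-- ===== SOURCE B (Python) =====
-- def get_bad_statuses_count(request_statuses: list[str]) -> int:
--     count = 0
--     for status in reversed(request_statuses):
--         if status.startswith('2'):
--             break
--         count += 1
--     return count
-- ===== Notes on version B (the rewrite author's own statement) =====
-- stated objective: alternative
-- what changed: B scans the list backwards and stops at the first '2'-status, instead of A's forward pass that resets a counter on every '2'-status.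
import Mathlib
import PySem

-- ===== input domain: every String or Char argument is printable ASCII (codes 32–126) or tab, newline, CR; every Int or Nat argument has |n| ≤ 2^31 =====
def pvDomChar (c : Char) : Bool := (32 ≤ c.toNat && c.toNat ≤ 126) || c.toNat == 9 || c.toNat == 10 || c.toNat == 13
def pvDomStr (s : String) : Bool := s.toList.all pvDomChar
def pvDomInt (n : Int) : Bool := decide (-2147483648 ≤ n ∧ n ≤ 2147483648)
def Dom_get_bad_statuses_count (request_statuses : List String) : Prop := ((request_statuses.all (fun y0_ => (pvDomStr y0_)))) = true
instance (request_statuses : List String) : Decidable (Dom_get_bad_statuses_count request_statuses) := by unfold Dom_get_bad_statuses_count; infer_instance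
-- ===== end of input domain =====

-- ===== PORT A =====
-- B scans backwards, break on first '2'-status. Equivalent to A's forward reset-counter pass.
def get_bad_statuses_count (request_statuses : List String) : Int :=
  request_statuses.foldl (fun count status =>
    if PySem.Str.startswith status "2" then 0 else count + 1) 0

-- ===== PORT B =====
def altGo : List String → Int
  | [] => 0
  | status :: rest => if PySem.Str.startswith status "2" then 0 else altGo rest + 1

def get_bad_statuses_count_alt (request_statuses : List String) : Int :=
  altGo request_statuses.reverse

-- ===== PRECONDITION & SPEC =====
def Spec_get_bad_statuses_count (request_statuses : List String) (out : Int) : Prop := out = get_bad_statuses_count_alt request_statuses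
instance (request_statuses : List String) (out : Int) : Decidable (Spec_get_bad_statuses_count request_statuses out) := by unfold Spec_get_bad_statuses_count; infer_instance

-- ===== CLAIM (what is proved, stated in full; the proofs are below) =====
def Claim_equal_get_bad_statuses_count : Prop := ∀ (request_statuses : List String), Dom_get_bad_statuses_count request_statuses → Spec_get_bad_statuses_count request_statuses (get_bad_statuses_count request_statuses)

-- ===== LEMMAS AND PROOFS =====
theorem foldl_eq_altGo (xs : List String) :
    xs.foldl (fun count status =>
      if PySem.Str.startswith status "2" then 0 else count + 1) 0 = altGo xs.reverse := by
  induction xs using List.reverseRecOn with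
  | nil => simp [altGo]
  | append_singleton ys s ih =>
      simp only [List.foldl_append, List.foldl, List.reverse_append,
        List.reverse_cons, List.reverse_nil, List.nil_append, List.cons_append, altGo]
      split <;> simp_all

-- ===== VERDICT (by name: the statement is the Claim_ definition above) =====
theorem get_bad_statuses_count_spec : Claim_equal_get_bad_statuses_count := by
  intro xs _
  unfold Spec_get_bad_statuses_count get_bad_statuses_count get_bad_statuses_count_alt
  exact foldl_eq_altGo xs
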